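-- pv_equiv track=rewrite | github.com/SilviuIordache/AOC | 2019/3/smart.py | get_line_data
-- ===== SOURCE A (Python) =====
-- def get_line_data(coords):
--     last_x = 0
--     last_y = 0
--     data = []
--     for item in coords:
--         data.append([last_x, last_y, item[0], item[1]])
--         last_x = item[0]
--         last_y = item[1]
--     return data
-- ===== SOURCE B (Python) =====
-- def get_line_data(coords):
--     # Flatten into one coordinate stream starting at the origin, then cut
--     # overlapping windows of 4 values with stride 2: window i is segment i.
--     flat = [0, 0]
--     for c in coords:
--         flat.append(c[0])
--         flat.append(c[1])
--     return [flat[2 * i: 2 * i + 4] for i in range(len(coords))]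
-- ===== Notes on version B (the rewrite author's own statement) =====
-- stated objective: alternative
-- what changed: replaces the pair-with-predecessor loop by a flat coordinate stream [0,0,x1,y1,...] sliced into overlapping windows of 4 with stride 2, so no predecessor state or point pairing exists
import Mathlib
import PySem

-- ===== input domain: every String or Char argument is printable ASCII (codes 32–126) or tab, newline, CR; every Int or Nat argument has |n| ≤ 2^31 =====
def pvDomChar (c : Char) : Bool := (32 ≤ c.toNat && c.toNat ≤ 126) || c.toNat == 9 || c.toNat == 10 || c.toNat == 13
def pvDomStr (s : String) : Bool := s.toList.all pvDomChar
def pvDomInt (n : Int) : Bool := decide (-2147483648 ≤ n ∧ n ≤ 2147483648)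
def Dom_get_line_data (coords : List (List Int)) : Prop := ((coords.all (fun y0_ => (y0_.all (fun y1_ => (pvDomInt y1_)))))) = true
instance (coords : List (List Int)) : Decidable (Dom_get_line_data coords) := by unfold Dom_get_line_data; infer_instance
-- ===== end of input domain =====

-- B replaces the pair-with-predecessor loop by a flat coordinate stream [0,0,x1,y1,...] sliced into overlapping stride-2 windows of 4 (alternative decomposition, same cost).


-- ===== PORT A =====
-- item[0] / item[1] via pyGet?; .getD 0 is never reached under Pre_ (IndexError inputs are excluded there)
def get_line_data (coords : List (List Int)) : List (List Int) :=
  (coords.foldl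
    (fun (s : Int × Int × List (List Int)) item =>
      let x := (PySem.List.pyGet? item 0).getD 0
      let y := (PySem.List.pyGet? item 1).getD 0
      (x, y, s.2.2 ++ [[s.1, s.2.1, x, y]]))
    (0, 0, [])).2.2

-- ===== PORT B =====
-- flat is built by the appending loop; the comprehension slices flat[2*i : 2*i+4] over range(len(coords))
def get_line_data_alt (coords : List (List Int)) : List (List Int) :=
  let flat : List Int :=
    coords.foldl
      (fun f c => (f ++ [(PySem.List.pyGet? c 0).getD 0]) ++ [(PySem.List.pyGet? c 1).getD 0])
      [0, 0]
  (PySem.List.pyRange 0 (PySem.List.len coords) 1).map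
    (fun i => PySem.List.slice flat (some (2 * i)) (some (2 * i + 4)))

-- ===== PRECONDITION & SPEC =====
-- Pre_ excludes exactly the inputs on which A raises IndexError (an item with fewer than 2 entries)
def Pre_get_line_data (coords : List (List Int)) : Prop :=
  ∀ c ∈ coords, 2 ≤ c.length
instance (coords : List (List Int)) : Decidable (Pre_get_line_data coords) := by unfold Pre_get_line_data; infer_instance
def pvWitness_get_line_data : List (List Int) := [[1, 2], [3, 4]]

def Spec_get_line_data (coords : List (List Int)) (out : List (List Int)) : Prop := out = get_line_data_alt coords
instance (coords : List (List Int)) (out : List (List Int)) : Decidable (Spec_get_line_data coords out) := by unfold Spec_get_line_data; infer_instance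

-- ===== CLAIM =====
def Claim_equal_get_line_data : Prop := ∀ (coords : List (List Int)), Dom_get_line_data coords → Pre_get_line_data coords → Spec_get_line_data coords (get_line_data coords)

-- ===== LEMMAS AND PROOFS =====

-- the per-item coordinates both ports read
def pvX (c : List Int) : Int := (PySem.List.pyGet? c 0).getD 0
def pvY (c : List Int) : Int := (PySem.List.pyGet? c 1).getD 0

-- reference form of the segment list
def pvSegs (lx ly : Int) : List (List Int) → List (List Int)
  | [] => []
  | c :: cs => [lx, ly, pvX c, pvY c] :: pvSegs (pvX c) (pvY c) cs

-- the flat coordinate stream without the origin prefix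
def pvFlat : List (List Int) → List Int
  | [] => []
  | c :: cs => pvX c :: pvY c :: pvFlat cs

lemma a_foldl (coords : List (List Int)) :
    ∀ (lx ly : Int) (acc : List (List Int)),
      (coords.foldl
        (fun (s : Int × Int × List (List Int)) item =>
          let x := (PySem.List.pyGet? item 0).getD 0
          let y := (PySem.List.pyGet? item 1).getD 0
          (x, y, s.2.2 ++ [[s.1, s.2.1, x, y]]))
        (lx, ly, acc)).2.2 = acc ++ pvSegs lx ly coords := by
  induction coords with
  | nil => simp [pvSegs]
  | cons c cs ih =>
    intro lx ly acc
    simp only [List.foldl_cons]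
    rw [ih]
    simp [pvSegs, pvX, pvY]

lemma b_flat (coords : List (List Int)) :
    ∀ (acc : List Int),
      coords.foldl
        (fun f c => (f ++ [(PySem.List.pyGet? c 0).getD 0]) ++ [(PySem.List.pyGet? c 1).getD 0])
        acc = acc ++ pvFlat coords := by
  induction coords with
  | nil => simp [pvFlat]
  | cons c cs ih =>
    intro acc
    simp only [List.foldl_cons]
    rw [ih]
    simp [pvFlat, pvX, pvY]

-- the window at 2k of the stream prefixed by (lx,ly) is the k-th segment
lemma windows_eq_segs (coords : List (List Int)) :
    ∀ (lx ly : Int),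
      (List.range coords.length).map
        (fun k => ((lx :: ly :: pvFlat coords).drop (2 * k)).take 4) = pvSegs lx ly coords := by
  induction coords with
  | nil => simp [pvSegs]
  | cons c cs ih =>
    intro lx ly
    simp only [List.length_cons]
    rw [List.range_succ_eq_map]
    simp only [List.map_cons, List.map_map]
    simp only [pvSegs]
    congr 1
    rw [← ih (pvX c) (pvY c)]
    apply List.map_congr_left
    intro k _
    simp only [Function.comp_apply, pvFlat]
    have h : 2 * (k + 1) = 2 * k + 1 + 1 := by ring
    rw [h]
    simp [List.drop_succ_cons]

-- bridge: the pyRange/slice comprehension is exactly the List.range window map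
lemma b_eq_windows (coords : List (List Int)) :
    get_line_data_alt coords
      = (List.range coords.length).map
          (fun k => ((0 :: 0 :: pvFlat coords).drop (2 * k)).take 4) := by
  unfold get_line_data_alt
  rw [b_flat coords [0, 0]]
  rw [PySem.List.pyRange_one]
  simp only [PySem.List.len_eq, List.map_map, sub_zero, Int.toNat_natCast]
  apply List.map_congr_left
  intro k _
  simp only [Function.comp_apply, zero_add]
  have h2 : (2 * (k : Int)) = ((2 * k : Nat) : Int) := by push_cast; ring
  have h4 : (2 * (k : Int) + 4) = ((2 * k : Nat) : Int) + ((4 : Nat) : Int) := by push_cast; ring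
  rw [h4, h2, PySem.List.slice_natCast_add]
  rfl

-- ===== VERDICT =====
theorem get_line_data_spec : Claim_equal_get_line_data := by
  intro coords _ _
  unfold Spec_get_line_data get_line_data
  rw [a_foldl coords 0 0 [], b_eq_windows coords, windows_eq_segs coords 0 0]
  simp
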